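-- pv_equiv track=rewrite | github.com/Tabing010102/shell-mcp | src/shell_mcp/command_parser.py | _consume_backticks
-- ===== SOURCE A (Python) =====
-- def _consume_backticks(text: str, start_index: int) -> tuple[str, int]:
--     """Consume a backtick command substitution."""
--     i = start_index
--     while i < len(text):
--         if text[i] == "\\" and i + 1 < len(text):
--             i += 2
--         elif text[i] == "`":
--             return (text[start_index:i], i + 1)
--         else:
--             i += 1
--
--     return (text[start_index:], len(text))
-- ===== SOURCE B (Python) =====
-- def _consume_backticks(text: str, start_index: int) -> tuple[str, int]:
--     """Consume a backtick command substitution (find + backslash-run parity)."""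
--     pos = start_index
--     while True:
--         p = text.find("`", pos)
--         if p == -1:
--             return (text[start_index:], len(text))
--         j = p
--         while j > pos and text[j - 1] == "\\":
--             j -= 1
--         if (p - j) % 2 == 0:
--             return (text[start_index:p], p + 1)
--         pos = p + 1
-- ===== Notes on version B (the rewrite author's own statement) =====
-- stated objective: faster
-- what changed: A scans one character at a time with an index loop that steps over escape pairs; B repeatedly jumps to the next backtick with str.find and decides escapedness by the parity of the run of backslashes immediately before it.
-- outside the precondition, e.g. on _consume_backticks('a`', -2): A returns ('a', 0), B returns ('a', 2)
import Mathlib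
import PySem

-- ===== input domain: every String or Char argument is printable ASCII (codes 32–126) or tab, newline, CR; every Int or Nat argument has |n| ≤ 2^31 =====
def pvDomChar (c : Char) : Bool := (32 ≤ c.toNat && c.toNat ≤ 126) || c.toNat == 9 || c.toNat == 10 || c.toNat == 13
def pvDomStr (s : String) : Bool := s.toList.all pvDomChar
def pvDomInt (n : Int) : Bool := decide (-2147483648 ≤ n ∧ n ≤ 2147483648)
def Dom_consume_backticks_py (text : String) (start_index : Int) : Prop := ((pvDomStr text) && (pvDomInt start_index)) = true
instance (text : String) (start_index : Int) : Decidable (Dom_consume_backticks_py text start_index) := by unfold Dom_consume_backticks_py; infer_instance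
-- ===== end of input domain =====

-- B replaces A's per-character index loop by repeated text.find('`', pos) jumps plus a
-- backslash-run parity test before each found backtick; equivalence is proved for
-- start_index ≥ 0 (Pre_). Loops are ported as fuel recursion; each fuel bound exceeds the
-- loop's iteration count, so the fuel-exhausted base case is never reached.

-- ===== PORT A =====
-- A's while loop: i advances by 2 over "\x" pairs, returns at an unescaped backtick
def pvAGo (cs : List Char) (s : Int) : Nat → Int → String × Int
  | fuel + 1, i =>
    if i < (cs.length : Int) then
      if PySem.List.pyGet? cs i = some '\\' ∧ i + 1 < (cs.length : Int) then
        pvAGo cs s fuel (i + 2)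
      else if PySem.List.pyGet? cs i = some '`' then
        (String.ofList (PySem.List.slice cs (some s) (some i)), i + 1)
      else
        pvAGo cs s fuel (i + 1)
    else
      (String.ofList (PySem.List.slice cs (some s) none), (cs.length : Int))
  | 0, _ =>
      (String.ofList (PySem.List.slice cs (some s) none), (cs.length : Int))

def consume_backticks_py (text : String) (start_index : Int) : String × Int :=
  pvAGo text.toList start_index
    (((text.toList.length : Int) - start_index).toNat + 1) start_index

-- ===== PORT B =====
-- B's inner while loop: back up over the backslashes immediately preceding index j (not past pos)
def pvBCount (cs : List Char) (pos : Int) : Nat → Int → Int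
  | fuel + 1, j =>
    if pos < j ∧ PySem.List.pyGet? cs (j - 1) = some '\\' then
      pvBCount cs pos fuel (j - 1)
    else j
  | 0, j => j

-- B's outer loop: jump to the next backtick, test the parity of the backslash run before it
def pvBGo (cs : List Char) (s : Int) : Nat → Int → String × Int
  | fuel + 1, pos =>
    let p := PySem.Chars.findFrom cs ['`'] pos
    if p = -1 then
      (String.ofList (PySem.List.slice cs (some s) none), (cs.length : Int))
    else
      let j := pvBCount cs pos ((p - pos).toNat + 1) p
      if PySem.Int.mod (p - j) 2 = 0 then
        (String.ofList (PySem.List.slice cs (some s) (some p)), p + 1)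
      else
        pvBGo cs s fuel (p + 1)
  | 0, _ =>
      (String.ofList (PySem.List.slice cs (some s) none), (cs.length : Int))

def consume_backticks_py_alt (text : String) (start_index : Int) : String × Int :=
  pvBGo text.toList start_index
    (((text.toList.length : Int) + 1 - start_index).toNat + 1) start_index

-- ===== PRECONDITION & SPEC =====
-- Pre_ excludes negative start_index: there Python's negative-index and negative-slice
-- wraparound makes A's returned pair an accident of index arithmetic that A and B resolve
-- differently (and for start_index < -len(text), A raises IndexError).
def Pre_consume_backticks_py (text : String) (start_index : Int) : Prop := 0 ≤ start_index
instance (text : String) (start_index : Int) : Decidable (Pre_consume_backticks_py text start_index) := by unfold Pre_consume_backticks_py; infer_instance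

def pvWitness_consume_backticks_py : String × Int := ("a\\``b", 0)

def Spec_consume_backticks_py (text : String) (start_index : Int) (out : String × Int) : Prop := out = consume_backticks_py_alt text start_index
instance (text : String) (start_index : Int) (out : String × Int) : Decidable (Spec_consume_backticks_py text start_index out) := by unfold Spec_consume_backticks_py; infer_instance

-- ===== CLAIM (what is proved, stated in full; the proofs are below) =====
def Claim_equal_consume_backticks_py : Prop := ∀ (text : String) (start_index : Int), Dom_consume_backticks_py text start_index → Pre_consume_backticks_py text start_index → Spec_consume_backticks_py text start_index (consume_backticks_py text start_index)

-- ===== LEMMAS AND PROOFS =====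

-- fuel-free views of the three loops (definitionally the fuel the wrappers pass)
def pvA (cs : List Char) (s : Int) (i : Int) : String × Int :=
  pvAGo cs s (((cs.length : Int) - i).toNat + 1) i

def pvBC (cs : List Char) (pos : Int) (j : Int) : Int :=
  pvBCount cs pos ((j - pos).toNat + 1) j

def pvB (cs : List Char) (s : Int) (pos : Int) : String × Int :=
  pvBGo cs s (((cs.length : Int) + 1 - pos).toNat + 1) pos

-- A's loop result does not depend on the fuel once it covers the remaining iterations
theorem pvAGo_stable (cs : List Char) (s : Int) :
    ∀ f g : Nat, ∀ i : Int, (cs.length : Int) < i + f → (cs.length : Int) < i + g →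
    pvAGo cs s f i = pvAGo cs s g i := by
  intro f
  induction f with
  | zero =>
    intro g i hf hg
    cases g with
    | zero => rfl
    | succ g' =>
      rw [pvAGo, pvAGo, if_neg (by omega)]
  | succ f' IH =>
    intro g i hf hg
    by_cases hi : i < (cs.length : Int)
    · have hg1 : 1 ≤ g := by omega
      obtain ⟨g', rfl⟩ : ∃ g', g = g' + 1 := ⟨g - 1, by omega⟩
      rw [pvAGo, pvAGo]
      simp only [if_pos hi]
      by_cases h1 : PySem.List.pyGet? cs i = some '\\' ∧ i + 1 < (cs.length : Int)
      · simp only [if_pos h1]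
        exact IH g' (i + 2) (by omega) (by omega)
      · simp only [if_neg h1]
        by_cases h2 : PySem.List.pyGet? cs i = some '`'
        · simp only [if_pos h2]
        · simp only [if_neg h2]
          exact IH g' (i + 1) (by omega) (by omega)
    · cases g with
      | zero => rw [pvAGo, pvAGo, if_neg hi]
      | succ g' => rw [pvAGo, pvAGo]; simp only [if_neg hi]

-- one-step unfolding of A's loop in its fuel-free view
theorem pvA_eq (cs : List Char) (s i : Int) :
    pvA cs s i =
      if i < (cs.length : Int) then
        if PySem.List.pyGet? cs i = some '\\' ∧ i + 1 < (cs.length : Int) then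
          pvA cs s (i + 2)
        else if PySem.List.pyGet? cs i = some '`' then
          (String.ofList (PySem.List.slice cs (some s) (some i)), i + 1)
        else
          pvA cs s (i + 1)
      else
        (String.ofList (PySem.List.slice cs (some s) none), (cs.length : Int)) := by
  unfold pvA
  rw [pvAGo]
  split_ifs with h1 h2 h3 <;> try rfl
  · exact pvAGo_stable cs s (((cs.length : Int) - i).toNat) ((((cs.length : Int) - (i + 2)).toNat + 1)) (i + 2) (by omega) (by omega)
  · exact pvAGo_stable cs s (((cs.length : Int) - i).toNat) ((((cs.length : Int) - (i + 1)).toNat + 1)) (i + 1) (by omega) (by omega)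

-- B's inner loop is fuel-stable too
theorem pvBCount_stable (cs : List Char) (pos : Int) :
    ∀ f g : Nat, ∀ j : Int, j - pos < (f : Int) → j - pos < (g : Int) →
    pvBCount cs pos f j = pvBCount cs pos g j := by
  intro f
  induction f with
  | zero =>
    intro g j hf hg
    cases g with
    | zero => rfl
    | succ g' => rw [pvBCount, pvBCount, if_neg (by omega)]
  | succ f' IH =>
    intro g j hf hg
    by_cases hc : pos < j ∧ PySem.List.pyGet? cs (j - 1) = some '\\'
    · have hg1 : 1 ≤ g := by omega
      obtain ⟨g', rfl⟩ : ∃ g', g = g' + 1 := ⟨g - 1, by omega⟩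
      rw [pvBCount, pvBCount]; simp only [if_pos hc]
      exact IH g' (j - 1) (by omega) (by omega)
    · cases g with
      | zero => rw [pvBCount, pvBCount, if_neg hc]
      | succ g' => rw [pvBCount, pvBCount]; simp only [if_neg hc]

theorem pvBC_eq (cs : List Char) (pos j : Int) :
    pvBC cs pos j =
      if pos < j ∧ PySem.List.pyGet? cs (j - 1) = some '\\' then pvBC cs pos (j - 1)
      else j := by
  unfold pvBC
  rw [pvBCount]
  split_ifs with h1 <;> try rfl
  exact pvBCount_stable cs pos ((j - pos).toNat) (((j - 1 - pos).toNat + 1)) (j - 1) (by omega) (by omega)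

-- bounds of text.find(sub, pos) when it hits
theorem pvFindFrom_bounds (cs sub : List Char) (pos : Int)
    (h : PySem.Chars.findFrom cs sub pos ≠ -1) :
    pos ≤ PySem.Chars.findFrom cs sub pos ∧ PySem.Chars.findFrom cs sub pos ≤ (cs.length : Int) := by
  have key : ∀ (l : List Char), -1 ≤ PySem.Chars.find l sub ∧ (PySem.Chars.find l sub : Int) ≤ l.length :=
    fun l => ⟨PySem.Chars.neg_one_le_find l sub, PySem.Chars.find_le_length l sub⟩
  unfold PySem.Chars.findFrom at h ⊢
  simp only [Int.toNat_natCast, List.take_length] at h ⊢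
  split_ifs at h ⊢ with h1 h2 h3 h4 <;> try omega
  · have := key (List.drop (Int.toNat 0) cs)
    simp only [List.length_drop] at this; omega
  · have := key (List.drop (pos + ↑cs.length).toNat cs)
    simp only [List.length_drop] at this; omega
  · have := key (List.drop pos.toNat cs)
    simp only [List.length_drop] at this; omega

-- text.find(sub, pos) returns -1 for a nonnegative start past the end (CPython rule)
theorem pvFindFrom_past (cs sub : List Char) (pos : Int) (h0 : 0 ≤ pos) (h : (cs.length : Int) < pos) :
    PySem.Chars.findFrom cs sub pos = -1 := by
  unfold PySem.Chars.findFrom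
  simp only [Int.toNat_natCast, List.take_length]
  split_ifs with h1 h2 <;> first | rfl | (exfalso; omega)

-- B's outer loop is fuel-stable (for nonnegative positions)
theorem pvBGo_stable (cs : List Char) (s : Int) :
    ∀ f g : Nat, ∀ pos : Int, 0 ≤ pos → (cs.length : Int) + 1 < pos + f → (cs.length : Int) + 1 < pos + g →
    pvBGo cs s f pos = pvBGo cs s g pos := by
  intro f
  induction f with
  | zero =>
    intro g pos h0 hf hg
    cases g with
    | zero => rfl
    | succ g' =>
      rw [pvBGo, pvBGo]
      simp only [pvFindFrom_past cs ['`'] pos h0 (by omega), if_pos]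
  | succ f' IH =>
    intro g pos h0 hf hg
    by_cases hp : PySem.Chars.findFrom cs ['`'] pos = -1
    · cases g with
      | zero =>
        rw [pvBGo, pvBGo]
        simp only [hp, if_pos]
      | succ g' =>
        rw [pvBGo, pvBGo]
        simp only [hp, if_pos]
    · have hb := pvFindFrom_bounds cs ['`'] pos hp
      have hg1 : 1 ≤ g := by omega
      obtain ⟨g', rfl⟩ : ∃ g', g = g' + 1 := ⟨g - 1, by omega⟩
      rw [pvBGo, pvBGo]
      simp only [hp]
      by_cases hpar : PySem.Int.mod
          ((PySem.Chars.findFrom cs ['`'] pos) - pvBCount cs pos (((PySem.Chars.findFrom cs ['`'] pos) - pos).toNat + 1) (PySem.Chars.findFrom cs ['`'] pos)) 2 = 0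
      · rw [if_pos hpar, if_pos hpar]
      · rw [if_neg hpar, if_neg hpar]
        exact IH g' (PySem.Chars.findFrom cs ['`'] pos + 1) (by omega) (by omega) (by omega)

-- one-step unfolding of B's outer loop in its fuel-free view
theorem pvB_eq (cs : List Char) (s : Int) (pos : Int) (h0 : 0 ≤ pos) :
    pvB cs s pos =
      if PySem.Chars.findFrom cs ['`'] pos = -1 then
        (String.ofList (PySem.List.slice cs (some s) none), (cs.length : Int))
      else if PySem.Int.mod ((PySem.Chars.findFrom cs ['`'] pos) - pvBC cs pos (PySem.Chars.findFrom cs ['`'] pos)) 2 = 0 then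
        (String.ofList (PySem.List.slice cs (some s) (some (PySem.Chars.findFrom cs ['`'] pos))),
          PySem.Chars.findFrom cs ['`'] pos + 1)
      else
        pvB cs s (PySem.Chars.findFrom cs ['`'] pos + 1) := by
  unfold pvB pvBC
  rw [pvBGo]
  simp only []
  split_ifs with h1 h2 <;> try rfl
  have hb := pvFindFrom_bounds cs ['`'] pos h1
  exact pvBGo_stable cs s (((cs.length : Int) + 1 - pos).toNat)
    ((((cs.length : Int) + 1 - (PySem.Chars.findFrom cs ['`'] pos + 1)).toNat + 1))
    (PySem.Chars.findFrom cs ['`'] pos + 1) (by omega) (by omega) (by omega)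

-- a one-char pattern is a prefix of cs.drop m iff cs[m]? is that char
theorem pvSingleton_prefix_drop (cs : List Char) (c : Char) (m : Nat) :
    [c] <+: cs.drop m ↔ cs[m]? = some c := by
  rw [show cs[m]? = (cs.drop m)[0]? by simp]
  cases h : cs.drop m with
  | nil => simp
  | cons a t => simp [List.prefix_cons_iff]; exact eq_comm

-- A's scan walks unchanged through a backtick-free stretch whose left-closed end is clean
theorem pvAGo_through (cs : List Char) (s : Int) (q : Nat) (hq : q < cs.length) :
    ∀ d pos, pos + d = q → (∀ m, pos ≤ m → m < q → cs[m]? ≠ some '`') →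
    (q = pos ∨ cs[q-1]? ≠ some '\\') →
    pvA cs s (pos : Int) = pvA cs s (q : Int) := by
  intro d
  induction d using Nat.strong_induction_on with
  | _ d IH =>
    intro pos hdq hnb hclean
    rcases Nat.eq_zero_or_pos d with hd0 | hdpos
    · subst hd0; simp_all
    · have hposq : pos < q := by omega
      have hposlen : pos < cs.length := by omega
      have hcl : cs[q-1]? ≠ some '\\' := by
        rcases hclean with h | h
        · omega
        · exact h
      rw [pvA_eq]
      rw [if_pos (by exact_mod_cast hposlen)]
      rw [PySem.List.pyGet?_natCast]
      by_cases hbs : cs[pos]? = some '\\' ∧ (pos : Int) + 1 < (cs.length : Int)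
      · rw [if_pos hbs]
        have h2 : pos + 2 ≤ q := by
          by_contra hlt
          have : pos + 1 = q := by omega
          apply hcl; rw [← this]; simpa using hbs.1
        have : (pos : Int) + 2 = ((pos + 2 : Nat) : Int) := by push_cast; ring
        rw [this]
        exact IH (d - 2) (by omega) (pos + 2) (by omega)
          (fun m hm1 hm2 => hnb m (by omega) hm2) (Or.inr hcl)
      · rw [if_neg hbs]
        have htick : ¬ cs[pos]? = some '`' := hnb pos le_rfl hposq
        rw [if_neg htick]
        have : (pos : Int) + 1 = ((pos + 1 : Nat) : Int) := by push_cast; ring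
        rw [this]
        exact IH (d - 1) (by omega) (pos + 1) (by omega)
          (fun m hm1 hm2 => hnb m (by omega) hm2) (Or.inr hcl)

-- A's scan over a backslash run of length k followed by a backtick at P
theorem pvAGo_run (cs : List Char) (s : Int) (P : Nat)
    (hP : P < cs.length) (hPc : cs[P]? = some '`') :
    ∀ k j, j + k = P → (∀ m, j ≤ m → m < P → cs[m]? = some '\\') →
    (k % 2 = 0 → pvA cs s (j : Int) =
        (String.ofList (PySem.List.slice cs (some s) (some (P : Int))), (P : Int) + 1)) ∧
    (k % 2 = 1 → pvA cs s (j : Int) = pvA cs s ((P : Int) + 1)) := by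
  intro k
  induction k using Nat.strong_induction_on with
  | _ k IH =>
    intro j hjk hrun
    rcases Nat.lt_or_ge k 2 with hk2 | hk2
    · interval_cases k
      · -- k = 0 : j = P, standing on the backtick
        have hjP : j = P := by omega
        subst hjP
        constructor
        · intro _
          rw [pvA_eq, if_pos (by exact_mod_cast hP), PySem.List.pyGet?_natCast]
          rw [if_neg (by simp [hPc]), if_pos hPc]
        · intro h; omega
      · -- k = 1 : one backslash then the backtick
        constructor
        · intro h; omega
        · intro _
          have hjP : j + 1 = P := by omega
          rw [pvA_eq, if_pos (by exact_mod_cast (by omega : j < cs.length)), PySem.List.pyGet?_natCast]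
          rw [if_pos ⟨hrun j le_rfl (by omega), by exact_mod_cast (by omega : (j:Int) + 1 < cs.length)⟩]
          congr 1
          omega
    · -- k ≥ 2 : a pair of backslashes
      have hbs1 : cs[j]? = some '\\' := hrun j le_rfl (by omega)
      have step : pvA cs s (j : Int) = pvA cs s ((j + 2 : Nat) : Int) := by
        rw [pvA_eq, if_pos (by exact_mod_cast (by omega : j < cs.length)), PySem.List.pyGet?_natCast]
        rw [if_pos ⟨hbs1, by exact_mod_cast (by omega : (j:Int) + 1 < cs.length)⟩]
        norm_cast
      have := IH (k - 2) (by omega) (j + 2) (by omega)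
        (fun m hm1 hm2 => hrun m (by omega) hm2)
      constructor
      · intro hpar; rw [step]; exact this.1 (by omega)
      · intro hpar; rw [step]; exact this.2 (by omega)

-- A's scan with no backtick ahead returns the tail
theorem pvAGo_noTick (cs : List Char) (s : Int) :
    ∀ d pos, cs.length ≤ pos + d → (∀ m, pos ≤ m → m < cs.length → cs[m]? ≠ some '`') →
    pvA cs s (pos : Int) =
      (String.ofList (PySem.List.slice cs (some s) none), (cs.length : Int)) := by
  intro d
  induction d using Nat.strong_induction_on with
  | _ d IH =>
    intro pos hd hnb
    by_cases hlen : pos < cs.length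
    · rw [pvA_eq, if_pos (by exact_mod_cast hlen), PySem.List.pyGet?_natCast]
      by_cases hbs : cs[pos]? = some '\\' ∧ (pos : Int) + 1 < (cs.length : Int)
      · rw [if_pos hbs]
        rw [show (pos : Int) + 2 = ((pos + 2 : Nat) : Int) by push_cast; ring]
        exact IH (d - 2) (by omega) (pos + 2) (by omega) (fun m h1 h2 => hnb m (by omega) h2)
      · rw [if_neg hbs, if_neg (hnb pos le_rfl hlen)]
        rw [show (pos : Int) + 1 = ((pos + 1 : Nat) : Int) by push_cast; ring]
        exact IH (d - 1) (by omega) (pos + 1) (by omega) (fun m h1 h2 => hnb m (by omega) h2)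
    · rw [pvA_eq, if_neg (by exact_mod_cast hlen)]

-- characterisation of B's inner backward loop
theorem pvBCount_spec (cs : List Char) (pos : Nat) :
    ∀ d P, pos ≤ P → P ≤ pos + d →
    ∃ J : Nat, pvBC cs (pos : Int) (P : Int) = (J : Int) ∧ pos ≤ J ∧ J ≤ P ∧
      (∀ m, J ≤ m → m < P → cs[m]? = some '\\') ∧
      (J = pos ∨ cs[J-1]? ≠ some '\\') := by
  intro d
  induction d using Nat.strong_induction_on with
  | _ d IH =>
    intro P hpP hPd
    by_cases hc : (pos : Int) < (P : Int) ∧ PySem.List.pyGet? cs ((P : Int) - 1) = some '\\'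
    · rw [pvBC_eq, if_pos hc]
      have hP1 : ((P : Int) - 1) = ((P - 1 : Nat) : Int) := by omega
      obtain ⟨J, hJ, h1, h2, h3, h4⟩ := IH (d - 1) (by omega) (P - 1) (by omega) (by omega)
      rw [hP1]
      refine ⟨J, hJ, h1, by omega, ?_, h4⟩
      intro m hm1 hm2
      rcases Nat.lt_or_ge m (P - 1) with h | h
      · exact h3 m hm1 h
      · have hmP : m = P - 1 := by omega
        subst hmP
        rw [← PySem.List.pyGet?_natCast, ← hP1]
        exact hc.2
    · rw [pvBC_eq, if_neg hc]
      refine ⟨P, rfl, hpP, le_rfl, by omega, ?_⟩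
      rcases Nat.eq_or_lt_of_le hpP with h | h
      · exact Or.inl h.symm
      · right
        intro hcon
        apply hc
        refine ⟨by exact_mod_cast h, ?_⟩
        rw [show ((P : Int) - 1) = ((P - 1 : Nat) : Int) by omega, PySem.List.pyGet?_natCast]
        exact hcon

-- no backtick occurrence after pos, pointwise form
theorem pvNoTick_of_not_infix (cs : List Char) (pos : Nat)
    (h : ¬ ['`'] <:+: cs.drop pos) :
    ∀ m, pos ≤ m → m < cs.length → cs[m]? ≠ some '`' := by
  intro m h1 h2 hc
  apply h
  have hpre : ['`'] <+: List.drop (m - pos) (List.drop pos cs) := by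
    rw [List.drop_drop, show pos + (m - pos) = m by omega]
    exact (pvSingleton_prefix_drop cs '`' m).mpr hc
  exact hpre.isInfix.trans (List.drop_suffix _ _).isInfix

-- main loop equivalence, from any common nonnegative position
theorem pvMain (cs : List Char) (s : Int) :
    ∀ d pos, cs.length + 1 ≤ pos + d → pvA cs s (pos : Int) = pvB cs s (pos : Int) := by
  intro d
  induction d using Nat.strong_induction_on with
  | _ d IH =>
    intro pos hd
    by_cases hpos : cs.length < pos
    · rw [pvA_eq, if_neg (by exact_mod_cast (by omega : ¬ (pos : Int) < (cs.length : Int)))]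
      rw [pvB_eq cs s (pos : Int) (by omega)]
      rw [if_pos (pvFindFrom_past cs ['`'] (pos : Int) (by omega) (by exact_mod_cast hpos))]
    · have hple : pos ≤ cs.length := by omega
      rw [pvB_eq cs s (pos : Int) (by omega)]
      by_cases hp : PySem.Chars.findFrom cs ['`'] (pos : Int) = -1
      · rw [if_pos hp]
        have hni := (PySem.Chars.findFrom_natCast_eq_neg_one_iff cs ['`'] pos hple).mp hp
        exact pvAGo_noTick cs s (cs.length) pos (by omega) (pvNoTick_of_not_infix cs pos hni)
      · rw [if_neg hp]
        obtain ⟨hge, hpre, hmin⟩ := PySem.Chars.findFrom_natCast_spec cs ['`'] pos hple hp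
        have hpP : PySem.Chars.findFrom cs ['`'] (pos : Int)
            = ((PySem.Chars.findFrom cs ['`'] (pos : Int)).toNat : Int) := by omega
        set P := (PySem.Chars.findFrom cs ['`'] (pos : Int)).toNat with hPdef
        have hPc : cs[P]? = some '`' := (pvSingleton_prefix_drop cs '`' P).mp hpre
        have hPlen : P < cs.length := by
          have := hpre.length_le
          simp only [List.length_drop, List.length_cons, List.length_nil] at this
          omega
        have hposP : pos ≤ P := by omega
        have hnb : ∀ m, pos ≤ m → m < P → cs[m]? ≠ some '`' := by
          intro m h1 h2 hc
          exact hmin m h1 h2 ((pvSingleton_prefix_drop cs '`' m).mpr hc)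
        obtain ⟨J, hJ, hJ1, hJ2, hrun, hclean⟩ := pvBCount_spec cs pos (P - pos) P hposP (by omega)
        rw [hpP, hJ]
        rw [show ((P : Int) - (J : Int)) = ((P - J : Nat) : Int) by omega]
        have hm2 : PySem.Int.mod ((P - J : Nat) : Int) 2 = (((P - J) % 2 : Nat) : Int) := by
          exact_mod_cast PySem.Int.mod_natCast (P - J) 2
        rw [hm2]
        have hthrough := pvAGo_through cs s J (by omega) (J - pos) pos (by omega)
          (fun m h1 h2 => hnb m h1 (by omega)) hclean
        have hruns := pvAGo_run cs s P hPlen hPc (P - J) J (by omega) hrun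
        by_cases hpar : (P - J) % 2 = 0
        · rw [if_pos (by exact_mod_cast hpar)]
          rw [hthrough, hruns.1 hpar]
        · rw [if_neg (by exact_mod_cast hpar)]
          rw [hthrough, hruns.2 (by omega)]
          rw [show ((P : Int) + 1) = ((P + 1 : Nat) : Int) by push_cast; ring]
          exact IH (d - 1) (by omega) (P + 1) (by omega)

-- ===== VERDICT (by name: the statement is the Claim_ definition above) =====
theorem consume_backticks_py_spec : Claim_equal_consume_backticks_py := by
  intro text start_index _hd hpre
  unfold Spec_consume_backticks_py consume_backticks_py consume_backticks_py_alt
  obtain ⟨k, rfl⟩ := Int.eq_ofNat_of_zero_le hpre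
  exact pvMain text.toList _ (text.toList.length + 1) k (by omega)
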